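-- pv_equiv track=rewrite | github.com/linhdvu14/cp-sols | sols/CodeForces/1699_d2/B_Almost_Ternary_Matrix.py | solve
-- ===== SOURCE A (Python) =====
-- def solve(R, C):
--     r1 = [1, 0, 0, 1] * (C // 4) + [1, 0] * ((C % 4) // 2)
--     r2 = [0, 1, 1, 0] * (C // 4) + [0, 1] * ((C % 4) // 2)
--     res = []
--     for _ in range(R//2):
--         res.append(r1)
--         res.append(r2)
--         r1, r2 = r2, r1
--     return res
-- ===== SOURCE B (Python) =====
-- def solve(R, C):
--     def row(i):
--         ih = (i + 1) // 2 + 1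
--         return [(ih + (j + 1) // 2) % 2 for j in range(2 * (C // 2))]
--     return [row(i) for i in range(2 * (R // 2))]
-- ===== Notes on version B (the rewrite author's own statement) =====
-- stated objective: idiomatic
-- what changed: Replaces A's hand-built base rows (list repetition plus tail) and append-and-swap loop by a comprehension that computes every row independently, each cell arithmetically as ((i+1)//2 + (j+1)//2 + 1) % 2 over 2*(R//2) rows and 2*(C//2) columns.
-- intended difference: For negative C with C % 4 in {2,3} and R >= 2, A returns 2*(R//2) rows equal to [1,0]/[0,1] - a leftover of Python's clamped negative list repetition - while B returns empty rows, the intended value for a non-positive matrix width. — e.g. on solve(2, -1): A returns [[1, 0], [0, 1]], B returns [[], []]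
import Mathlib
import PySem

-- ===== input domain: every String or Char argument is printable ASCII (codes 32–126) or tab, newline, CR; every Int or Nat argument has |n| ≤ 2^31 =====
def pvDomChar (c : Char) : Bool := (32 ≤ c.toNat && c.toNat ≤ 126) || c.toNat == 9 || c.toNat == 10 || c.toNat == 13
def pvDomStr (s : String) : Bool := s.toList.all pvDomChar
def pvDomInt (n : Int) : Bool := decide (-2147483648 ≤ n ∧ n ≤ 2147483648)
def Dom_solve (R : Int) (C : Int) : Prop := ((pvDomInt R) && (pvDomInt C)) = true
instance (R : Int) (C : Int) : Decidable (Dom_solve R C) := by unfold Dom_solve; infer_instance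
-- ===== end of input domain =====

-- B replaces A's hand-built rows and append-and-swap loop by one nested comprehension
-- computing each cell arithmetically (objective: more idiomatic; same O(R*C) cost).

-- ===== PORT A =====
-- Python 'xs * n' (clamps at 0 for n ≤ 0, exactly like Python list repetition)
def pyListMul (xs : List Int) (n : Int) : List Int := (List.replicate n.toNat xs).flatten

-- the 'for _ in range(R//2): append r1; append r2; swap' loop
def solveLoop : Nat → List Int → List Int → List (List Int)
  | 0, _, _ => []
  | n+1, r1, r2 => r1 :: r2 :: solveLoop n r2 r1

def solve (R : Int) (C : Int) : List (List Int) :=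
  let r1 := pyListMul [1, 0, 0, 1] (PySem.Int.floordiv C 4) ++
            pyListMul [1, 0] (PySem.Int.floordiv (PySem.Int.mod C 4) 2)
  let r2 := pyListMul [0, 1, 1, 0] (PySem.Int.floordiv C 4) ++
            pyListMul [0, 1] (PySem.Int.floordiv (PySem.Int.mod C 4) 2)
  solveLoop (PySem.Int.floordiv R 2).toNat r1 r2

-- ===== PORT B =====
-- Source B's helper row(i) (hoists ih = (i + 1) // 2 + 1, then one comprehension per row)
def rowAltB (C i : Int) : List Int :=
  let ih := PySem.Int.floordiv (i + 1) 2 + 1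
  (PySem.List.pyRange 0 (2 * PySem.Int.floordiv C 2) 1).map
    (fun j => PySem.Int.mod (ih + PySem.Int.floordiv (j + 1) 2) 2)

def solve_alt (R : Int) (C : Int) : List (List Int) :=
  (PySem.List.pyRange 0 (2 * PySem.Int.floordiv R 2) 1).map (fun i => rowAltB C i)

-- ===== PRECONDITION & SPEC =====
-- For negative C with C % 4 ∈ {2,3} and R ≥ 2, A returns 2*(R//2) rows equal to [1,0]/[0,1]
-- (a leftover of Python's clamped negative list repetition), while B returns empty rows,
-- the intended value for a non-positive matrix width.
def D_solve (R : Int) (C : Int) : Prop := 2 ≤ R ∧ C < 0 ∧ 2 ≤ C % 4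
instance (R : Int) (C : Int) : Decidable (D_solve R C) := by unfold D_solve; infer_instance

def Spec_solve (R : Int) (C : Int) (out : List (List Int)) : Prop := ¬ D_solve R C → out = solve_alt R C
instance (R : Int) (C : Int) (out : List (List Int)) : Decidable (Spec_solve R C out) := by unfold Spec_solve; infer_instance

def pvDiffWitness_solve : Int × Int := (2, -1)
def pvDiffWitnessOut_solve : (List (List Int)) × (List (List Int)) := ([[1, 0], [0, 1]], [[], []])

-- ===== CLAIM (what is proved, stated in full; the proofs are below) =====
def Claim_unchanged_solve : Prop := ∀ (R : Int) (C : Int), Dom_solve R C → Spec_solve R C (solve R C)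
def Claim_changed_solve : Prop := Dom_solve (pvDiffWitness_solve.1) (pvDiffWitness_solve.2) ∧ D_solve (pvDiffWitness_solve.1) (pvDiffWitness_solve.2) ∧ solve (pvDiffWitness_solve.1) (pvDiffWitness_solve.2) = pvDiffWitnessOut_solve.1 ∧ solve_alt (pvDiffWitness_solve.1) (pvDiffWitness_solve.2) = pvDiffWitnessOut_solve.2 ∧ pvDiffWitnessOut_solve.1 ≠ pvDiffWitnessOut_solve.2
def Claim_exact_solve : Prop := ∀ (R : Int) (C : Int), Dom_solve R C → D_solve R C → solve R C ≠ solve_alt R C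

-- ===== LEMMAS AND PROOFS =====

-- the per-cell value Source B's row(i) computes (proof-side view of the port)
def cellB (i j : Int) : Int :=
  PySem.Int.mod (PySem.Int.floordiv (i + 1) 2 + PySem.Int.floordiv (j + 1) 2 + 1) 2

lemma cellB_eq (i j : Int) : cellB i j = ((i + 1) / 2 + (j + 1) / 2 + 1) % 2 := by
  unfold cellB
  rw [PySem.Int.floordiv_eq_ediv_of_pos (by norm_num), PySem.Int.floordiv_eq_ediv_of_pos (by norm_num),
      PySem.Int.mod_eq_emod_of_pos (by norm_num)]

-- B's row at outer index i
def rowB (C i : Int) : List Int :=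
  (PySem.List.pyRange 0 (2 * PySem.Int.floordiv C 2) 1).map (fun j => cellB i j)

lemma rowAltB_eq (C i : Int) : rowAltB C i = rowB C i := by
  unfold rowAltB rowB
  apply List.map_congr_left
  intro j _
  unfold cellB
  congr 1
  ring

lemma solve_alt_eq (R C : Int) : solve_alt R C =
    (PySem.List.pyRange 0 (2 * PySem.Int.floordiv R 2) 1).map (rowB C) := by
  unfold solve_alt
  apply List.map_congr_left
  intro i _
  exact rowAltB_eq C i

lemma rowB_congr (C i i' : Int) (h : (i + 1) / 2 % 2 = (i' + 1) / 2 % 2) :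
    rowB C i = rowB C i' := by
  unfold rowB
  apply List.map_congr_left
  intro j _
  rw [cellB_eq, cellB_eq]
  omega

lemma cellB_period (i j : Int) : cellB i ((j : Int) + 4) = cellB i j := by
  rw [cellB_eq, cellB_eq]; omega

-- one generic 4-periodic row characterisation (front-peeling induction on m)
lemma row_block (i : Int) (m t : Nat) (ht : t ≤ 1) :
    (List.range (4 * m + 2 * t)).map (fun k : Nat => cellB i (k : Int)) =
      (List.replicate m ((List.range 4).map (fun k : Nat => cellB i (k : Int)))).flatten ++
      (List.replicate t ((List.range 2).map (fun k : Nat => cellB i (k : Int)))).flatten := by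
  induction m with
  | zero =>
      interval_cases t <;> simp
  | succ n ih =>
      have h4 : 4 * (n + 1) + 2 * t = 4 + (4 * n + 2 * t) := by omega
      rw [h4, List.range_add, List.map_append, List.map_map, List.replicate_succ,
          List.flatten_cons, List.append_assoc]
      congr 1
      rw [← ih]
      apply List.map_congr_left
      intro k _
      simp only [Function.comp]
      have : ((4 + k : Nat) : Int) = (k : Int) + 4 := by push_cast; ring
      rw [this, cellB_period]

lemma row4_zero : (List.range 4).map (fun k : Nat => cellB 0 (k : Int)) = [1, 0, 0, 1] := by decide
lemma row2_zero : (List.range 2).map (fun k : Nat => cellB 0 (k : Int)) = [1, 0] := by decide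
lemma row4_one : (List.range 4).map (fun k : Nat => cellB 1 (k : Int)) = [0, 1, 1, 0] := by decide
lemma row2_one : (List.range 2).map (fun k : Nat => cellB 1 (k : Int)) = [0, 1] := by decide

lemma rowB_as_range (C i : Int) (hC : 0 ≤ C) :
    rowB C i = (List.range (4 * (C / 4).toNat + 2 * ((C % 4) / 2).toNat)).map
      (fun k : Nat => cellB i (k : Int)) := by
  unfold rowB
  rw [PySem.Int.floordiv_eq_ediv_of_pos (by norm_num), PySem.List.pyRange_one]
  rw [List.map_map]
  have hlen : (2 * (C / 2) - 0).toNat = 4 * (C / 4).toNat + 2 * ((C % 4) / 2).toNat := by omega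
  rw [hlen]
  apply List.map_congr_left
  intro k _
  simp [Function.comp]

-- A's first base row equals B's row 0, second equals B's row 1 (C ≥ 0)
lemma r1_eq (C : Int) (hC : 0 ≤ C) :
    pyListMul [1, 0, 0, 1] (PySem.Int.floordiv C 4) ++
      pyListMul [1, 0] (PySem.Int.floordiv (PySem.Int.mod C 4) 2) = rowB C 0 := by
  rw [rowB_as_range C 0 hC, row_block _ _ _ (by omega), row4_zero, row2_zero]
  unfold pyListMul
  rw [PySem.Int.floordiv_eq_ediv_of_pos (by norm_num), PySem.Int.mod_eq_emod_of_pos (by norm_num),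
      PySem.Int.floordiv_eq_ediv_of_pos (by norm_num)]

lemma r2_eq (C : Int) (hC : 0 ≤ C) :
    pyListMul [0, 1, 1, 0] (PySem.Int.floordiv C 4) ++
      pyListMul [0, 1] (PySem.Int.floordiv (PySem.Int.mod C 4) 2) = rowB C 1 := by
  rw [rowB_as_range C 1 hC, row_block _ _ _ (by omega), row4_one, row2_one]
  unfold pyListMul
  rw [PySem.Int.floordiv_eq_ediv_of_pos (by norm_num), PySem.Int.mod_eq_emod_of_pos (by norm_num),
      PySem.Int.floordiv_eq_ediv_of_pos (by norm_num)]

-- the alternating loop, expressed as a map over row indices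
lemma solveLoop_map (C : Int) : ∀ (n : Nat) (k : Int),
    solveLoop n (rowB C (2 * k)) (rowB C (2 * k + 1)) =
      (List.range (2 * n)).map (fun r : Nat => rowB C (2 * k + (r : Int))) := by
  intro n
  induction n with
  | zero => intro k; simp [solveLoop]
  | succ n ih =>
      intro k
      have h2 : 2 * (n + 1) = 2 + 2 * n := by omega
      rw [h2, List.range_add, List.map_append, List.map_map]
      have hstep : (List.range (2 * n)).map ((fun r : Nat => rowB C (2 * k + (r : Int))) ∘ (2 + ·)) =
          (List.range (2 * n)).map (fun r : Nat => rowB C (2 * (k + 1) + (r : Int))) := by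
        apply List.map_congr_left
        intro r _
        simp only [Function.comp]
        congr 1
        push_cast
        ring
      rw [hstep]
      show rowB C (2 * k) :: rowB C (2 * k + 1) :: solveLoop n (rowB C (2 * k + 1)) (rowB C (2 * k)) = _
      have e1 : rowB C (2 * k + 1) = rowB C (2 * (k + 1)) := rowB_congr _ _ _ (by omega)
      have e2 : rowB C (2 * k) = rowB C (2 * (k + 1) + 1) := rowB_congr _ _ _ (by omega)
      rw [show solveLoop n (rowB C (2 * k + 1)) (rowB C (2 * k)) =
            solveLoop n (rowB C (2 * (k + 1))) (rowB C (2 * (k + 1) + 1)) by rw [← e1, ← e2],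
          ih (k + 1)]
      have hr2 : List.range 2 = [0, 1] := rfl
      rw [hr2, List.map_cons, List.map_cons, List.map_nil, List.cons_append, List.cons_append,
          List.nil_append]
      norm_num

lemma solveLoop_nil : ∀ n : Nat, solveLoop n [] [] = List.replicate (2 * n) [] := by
  intro n
  induction n with
  | zero => rfl
  | succ n ih =>
      have : 2 * (n + 1) = (2 * n) + 1 + 1 := by omega
      rw [this, List.replicate_succ, List.replicate_succ]
      simpa [solveLoop] using ih

lemma solve_alt_nil (R C : Int) (hC : C < 0) :
    solve_alt R C = List.replicate (2 * (PySem.Int.floordiv R 2)).toNat [] := by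
  rw [solve_alt_eq]
  have hrow : ∀ i : Int, rowB C i = [] := by
    intro i
    unfold rowB
    rw [PySem.Int.floordiv_eq_ediv_of_pos (by norm_num),
        PySem.List.pyRange_one_eq_nil (by omega)]
    rfl
  calc (PySem.List.pyRange 0 (2 * PySem.Int.floordiv R 2) 1).map (rowB C)
      = (PySem.List.pyRange 0 (2 * PySem.Int.floordiv R 2) 1).map (fun _ => []) := by
        apply List.map_congr_left; intro i _; exact hrow i
    _ = List.replicate (2 * (PySem.Int.floordiv R 2)).toNat [] := by
        rw [List.map_const']
        rw [PySem.List.length_pyRange_one]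
        norm_num

lemma fdR_toNat (R : Int) : (2 * PySem.Int.floordiv R 2).toNat = 2 * (PySem.Int.floordiv R 2).toNat := by
  rw [PySem.Int.floordiv_eq_ediv_of_pos (by norm_num : (0:Int) < 2)]
  omega

theorem solve_unchanged (R C : Int) (hD : ¬ D_solve R C) : solve R C = solve_alt R C := by
  by_cases hC : 0 ≤ C
  · -- main case: nonnegative width
    show solveLoop (PySem.Int.floordiv R 2).toNat _ _ = _
    rw [r1_eq C hC, r2_eq C hC]
    have h0 : rowB C 0 = rowB C (2 * 0) := by norm_num
    have h1 : rowB C 1 = rowB C (2 * 0 + 1) := by norm_num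
    rw [h0, h1, solveLoop_map C _ 0, solve_alt_eq]
    rw [PySem.List.pyRange_one]
    rw [List.map_map]
    have hlen : (2 * PySem.Int.floordiv R 2 - 0).toNat = 2 * (PySem.Int.floordiv R 2).toNat := by
      rw [PySem.Int.floordiv_eq_ediv_of_pos (by norm_num : (0:Int) < 2)]; omega
    rw [hlen]
    apply List.map_congr_left
    intro r _
    simp [Function.comp]
  · -- C < 0: ¬D forces the tail factor to vanish (or R < 2, where both are empty anyway)
    push Not at hC
    rw [solve_alt_nil R C hC, fdR_toNat]
    by_cases hR : 2 ≤ R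
    · have hmod : C % 4 < 2 := by
        by_contra h
        exact hD ⟨hR, hC, by omega⟩
      have ht : PySem.Int.floordiv (PySem.Int.mod C 4) 2 = 0 := by
        rw [PySem.Int.mod_eq_emod_of_pos (by norm_num), PySem.Int.floordiv_eq_ediv_of_pos (by norm_num)]
        omega
      have hq : (PySem.Int.floordiv C 4).toNat = 0 := by
        rw [PySem.Int.floordiv_eq_ediv_of_pos (by norm_num : (0:Int) < 4)]
        omega
      show solveLoop _ _ _ = _
      rw [ht]
      unfold pyListMul
      rw [hq]
      simp only [Int.toNat_zero, List.replicate, List.flatten_nil, List.append_nil]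
      exact solveLoop_nil _
    · -- R < 2: zero iterations on both sides
      have hn : (PySem.Int.floordiv R 2).toNat = 0 := by
        rw [PySem.Int.floordiv_eq_ediv_of_pos (by norm_num : (0:Int) < 2)]
        omega
      show solveLoop (PySem.Int.floordiv R 2).toNat _ _ = _
      rw [hn]
      rfl

lemma solve_head (R C : Int) (hD : D_solve R C) :
    ∃ l, solve R C = ([1, 0] : List Int) :: l := by
  obtain ⟨hR, hC, hm⟩ := hD
  have hq : (PySem.Int.floordiv C 4).toNat = 0 := by
    rw [PySem.Int.floordiv_eq_ediv_of_pos (by norm_num : (0:Int) < 4)]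
    omega
  have ht : (PySem.Int.floordiv (PySem.Int.mod C 4) 2).toNat = 1 := by
    rw [PySem.Int.mod_eq_emod_of_pos (by norm_num), PySem.Int.floordiv_eq_ediv_of_pos (by norm_num)]
    omega
  have hn : ∃ n : Nat, (PySem.Int.floordiv R 2).toNat = n + 1 := by
    have h1 : 1 ≤ (PySem.Int.floordiv R 2).toNat := by
      rw [PySem.Int.floordiv_eq_ediv_of_pos (by norm_num : (0:Int) < 2)]
      omega
    refine ⟨(PySem.Int.floordiv R 2).toNat - 1, ?_⟩
    omega
  obtain ⟨n, hn⟩ := hn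
  show ∃ l, solveLoop _ _ _ = _
  rw [hn]
  unfold pyListMul
  rw [hq, ht]
  exact ⟨_, rfl⟩

lemma solve_alt_head (R C : Int) (hD : D_solve R C) :
    ∃ l, solve_alt R C = ([] : List Int) :: l := by
  obtain ⟨hR, hC, _⟩ := hD
  rw [solve_alt_nil R C hC]
  have : 1 ≤ (2 * PySem.Int.floordiv R 2).toNat := by
    rw [PySem.Int.floordiv_eq_ediv_of_pos (by norm_num : (0:Int) < 2)]
    omega
  obtain ⟨n, hn⟩ : ∃ n : Nat, (2 * PySem.Int.floordiv R 2).toNat = n + 1 := by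
    refine ⟨(2 * PySem.Int.floordiv R 2).toNat - 1, ?_⟩
    omega
  rw [hn, List.replicate_succ]
  exact ⟨_, rfl⟩

-- ===== VERDICT (by name: the statement is the Claim_ definition above) =====
theorem solve_spec : Claim_unchanged_solve := by
  intro R C _ hD
  exact solve_unchanged R C hD

theorem solve_changed : Claim_changed_solve := by
  unfold Claim_changed_solve; decide

theorem solve_tight : Claim_exact_solve := by
  intro R C _ hD heq
  obtain ⟨l1, h1⟩ := solve_head R C hD
  obtain ⟨l2, h2⟩ := solve_alt_head R C hD
  rw [h1, h2] at heq
  simp at heq
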